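-- pv_equiv track=rewrite | github.com/Salah-SH/LLM_SC_audits | call_graph.py | group_sublists
-- ===== SOURCE A (Python) =====
-- class UnionFind:
--     def __init__(self):
--         self.parent = {}
--         self.rank = {}
--
--     def find(self, x):
--         if x not in self.parent:
--             self.parent[x] = x
--             self.rank[x] = 0
--         if self.parent[x] != x:
--             self.parent[x] = self.find(self.parent[x])
--         return self.parent[x]
--
--     def union(self, x, y):
--         rootX = self.find(x)
--         rootY = self.find(y)
--
--         if rootX == rootY:
--             return
--
--         if self.rank[rootX] > self.rank[rootY]:
--             self.parent[rootY] = rootX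
--         else:
--             self.parent[rootX] = rootY
--             if self.rank[rootX] == self.rank[rootY]:
--                 self.rank[rootY] += 1
--
-- def group_sublists(lst):
--     uf = UnionFind()
--
--     # Step 2: Union elements from sublists with common elements
--     for i in range(len(lst)):
--         for j in range(i+1, len(lst)):
--             for elem in lst[i]:
--                 if elem in lst[j]:
--                     uf.union(lst[i][0], lst[j][0])
--                     break
--
--     # Step 3: Group by the representative element
--     groups = {}
--     for sublist in lst:
--         root = uf.find(sublist[0])
--         if root not in groups:
--             groups[root] = set()
--         for elem in sublist:
--             groups[root].add(elem)
--
--     # Step 4: Output the grouped results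
--     result = [list(group) for group in groups.values()]
--
--     return result
-- ===== SOURCE B (Python) =====
-- def group_sublists(lst):
--     # Inverted index element -> indices of sublists containing it; replaces
--     # A's O(n^2 * m^2) pairwise membership scans.
--     index = {}
--     for j, sub in enumerate(lst):
--         for e in sub:
--             index.setdefault(e, []).append(j)
--
--     # Flat union-find over first elements: union by size, iterative find
--     # without path compression (chains stay O(log n) deep by the size rule).
--     parent = {}
--     size = {}
--
--     def find(x):
--         if x not in parent:
--             parent[x] = x
--             size[x] = 1
--         r = x
--         while parent[r] != r:
--             r = parent[r]
--         return r
--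
--     # Union each sublist with every later sublist sharing an element.
--     for i, sub in enumerate(lst):
--         nb = set()
--         for e in sub:
--             for j in index[e]:
--                 nb.add(j)
--         for j in sorted(nb):
--             if j > i:
--                 ra = find(lst[i][0])
--                 rb = find(lst[j][0])
--                 if ra != rb:
--                     if size[ra] < size[rb]:
--                         ra, rb = rb, ra
--                     parent[rb] = ra
--                     size[ra] += size[rb]
--
--     # Group by representative, staged: roots first, then the dict of sets.
--     roots = [find(sub[0]) for sub in lst]
--     groups = {}
--     for r, sub in zip(roots, lst):
--         if r not in groups:
--             groups[r] = set()
--         g = groups[r]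
--         for e in sub:
--             g.add(e)
--     return [list(g) for g in groups.values()]
-- ===== Notes on version B (the rewrite author's own statement) =====
-- stated objective: faster
-- what changed: B replaces A's O(n^2) pairwise element-by-element membership scans with an inverted index element->sublist-indices built in one pass, and A's recursive path-compressing rank union-find with a flat union-by-size one using an iterative non-compressing find; the grouping step is staged (roots list first, then the dict of sets).
import Mathlib
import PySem

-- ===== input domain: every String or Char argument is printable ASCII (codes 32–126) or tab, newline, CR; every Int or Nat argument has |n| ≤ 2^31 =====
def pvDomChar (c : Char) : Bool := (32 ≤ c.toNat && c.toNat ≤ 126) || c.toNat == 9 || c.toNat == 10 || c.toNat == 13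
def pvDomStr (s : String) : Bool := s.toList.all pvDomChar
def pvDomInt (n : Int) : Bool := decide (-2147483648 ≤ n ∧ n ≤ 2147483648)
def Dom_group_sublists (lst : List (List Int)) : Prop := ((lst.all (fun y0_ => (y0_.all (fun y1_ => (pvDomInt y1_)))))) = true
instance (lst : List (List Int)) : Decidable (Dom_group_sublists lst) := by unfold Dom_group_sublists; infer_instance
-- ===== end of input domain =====

-- B replaces A's O(n^2 * m^2) pairwise membership scans by an inverted index
-- element -> sublist indices built in one pass, and A's recursive path-compressing
-- rank union-find by a flat union-by-size one with an iterative, non-compressing find;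
-- the grouping phase is staged (roots list first, then the dict of sets).
-- Equivalence is about the RETURN value (neither program mutates lst).

-- ---- shared helper: exact hand model of CPython's set-of-small-int hash table ----
-- Needed because the Python returns list(set)-iteration order, which for ints is the
-- deterministic open-addressing table order (hash(n) = n, except hash(-1) = -2); exact
-- for the |n| ≤ 2^31 ints of the domain (validated against CPython 3.11 setobject.c).
def pyHashU (n : Int) : Nat := ((if n = -1 then -2 else n) % (2 ^ 64 : Int)).toNat

def tget (tbl : Array (Option Int)) (i : Nat) : Option Int := (tbl[i]?).getD none

-- linear probing over slots i+1 .. i+9 during a clean (re)insert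
def linScanClean (tbl : Array (Option Int)) (i : Nat) : Option Nat :=
  (List.range 9).findSome? (fun j => if tget tbl (i + 1 + j) = none then some (i + 1 + j) else none)

-- slot for set_insert_clean (fuel-guarded loop; the LCG probe sequence always terminates)
def slotClean (tbl : Array (Option Int)) : Nat → Nat → Nat → Nat
  | 0, i, _ => i
  | fuel + 1, i, perturb =>
    if tget tbl i = none then i
    else
      match (if i + 9 ≤ tbl.size - 1 then linScanClean tbl i else none) with
      | some s => s
      | none =>
        let p' := perturb >>> 5
        slotClean tbl fuel ((i * 5 + 1 + p') % tbl.size) p'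

-- linear probing during set_add_entry: some (some s) = free slot s, some none = key present
def linScanAdd (tbl : Array (Option Int)) (key : Int) (i probes : Nat) : Option (Option Nat) :=
  (List.range probes).findSome? (fun j =>
    match tget tbl (i + 1 + j) with
    | none => some (some (i + 1 + j))
    | some k => if k = key then some none else none)

def slotAdd (tbl : Array (Option Int)) (key : Int) : Nat → Nat → Nat → Option Nat
  | 0, _, _ => none
  | fuel + 1, i, perturb =>
    match tget tbl i with
    | none => some i
    | some k =>
      if k = key then none
      else
        match linScanAdd tbl key i (if i + 9 ≤ tbl.size - 1 then 9 else 0) with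
        | some r => r
        | none =>
          let p' := perturb >>> 5
          slotAdd tbl key fuel ((i * 5 + 1 + p') % tbl.size) p'

structure CPySet where
  table : Array (Option Int)
  fill : Nat
deriving Repr, DecidableEq

def CPySet.empty : CPySet := ⟨Array.replicate 8 none, 0⟩

def newSize : Nat → Nat → Nat → Nat
  | 0, cur, _ => cur
  | fuel + 1, cur, minused => if cur ≤ minused then newSize fuel (cur * 2) minused else cur

def CPySet.resize (s : CPySet) (minused : Nat) : CPySet :=
  let nsz := newSize 64 8 minused
  let tbl := s.table.foldl (fun tbl e =>
      match e with
      | none => tbl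
      | some k =>
        let hu := pyHashU k
        tbl.set! (slotClean tbl (64 + tbl.size) (hu % tbl.size) hu) (some k)) (Array.replicate nsz none)
  ⟨tbl, s.fill⟩

def CPySet.add (s : CPySet) (key : Int) : CPySet :=
  let hu := pyHashU key
  match slotAdd s.table key (64 + s.table.size) (hu % s.table.size) hu with
  | none => s
  | some slot =>
    let tbl := s.table.set! slot (some key)
    let fill := s.fill + 1
    if fill * 5 ≥ (tbl.size - 1) * 3 then
      CPySet.resize ⟨tbl, fill⟩ (if fill > 50000 then fill * 2 else fill * 4)
    else ⟨tbl, fill⟩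

def CPySet.toList (s : CPySet) : List Int := s.table.toList.filterMap id

-- ===== PORT A =====
-- the UnionFind class: parent/rank dicts, recursive find with path compression
structure UF where
  parent : PySem.Dict Int Int
  rank : PySem.Dict Int Int

-- fuel-guarded recursion (recursion depth is bounded by the proofs below; callers
-- pass lst.length * lst.length + 2, which the chains built here never exhaust)
def ufFind : Nat → UF → Int → UF × Int
  | 0, uf, x => (uf, x)
  | fuel + 1, uf, x =>
    let uf := if uf.parent.contains x then uf else ⟨uf.parent.insert x x, uf.rank.insert x 0⟩
    let px := uf.parent.getD x x
    if px ≠ x then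
      let r := ufFind fuel uf px
      let uf2 : UF := ⟨r.1.parent.insert x r.2, r.1.rank⟩
      (uf2, uf2.parent.getD x x)
    else (uf, px)

def ufUnion (fuel : Nat) (uf : UF) (x y : Int) : UF :=
  let fx := ufFind fuel uf x
  let fy := ufFind fuel fx.1 y
  let uf := fy.1
  let rootX := fx.2
  let rootY := fy.2
  if rootX = rootY then uf
  else if uf.rank.getD rootX 0 > uf.rank.getD rootY 0 then
    ⟨uf.parent.insert rootY rootX, uf.rank⟩
  else
    let uf : UF := ⟨uf.parent.insert rootX rootY, uf.rank⟩
    if uf.rank.getD rootX 0 = uf.rank.getD rootY 0 then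
      ⟨uf.parent, uf.rank.insert rootY (uf.rank.getD rootY 0 + 1)⟩
    else uf

def unionPassA (lst : List (List Int)) (fuel : Nat) : UF :=
  (PySem.List.pyRange 0 (lst.length : Int) 1).foldl (fun uf i =>
    (PySem.List.pyRange (i + 1) (lst.length : Int) 1).foldl (fun uf j =>
      -- 'for elem in lst[i]: if elem in lst[j]: union(...); break'
      match (PySem.List.pyGetD lst i []).find? (fun e => (PySem.List.pyGetD lst j []).contains e) with
      | some _ => ufUnion fuel uf (PySem.List.pyGetD (PySem.List.pyGetD lst i []) 0 0)
                                  (PySem.List.pyGetD (PySem.List.pyGetD lst j []) 0 0)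
      | none => uf) uf) ⟨PySem.Dict.empty, PySem.Dict.empty⟩

-- steps 3-4: one pass threading the union-find, building the dict of sets in place
-- sublist[0] is PySem.List.pyGetD sublist 0 0: total stand-in, exact under Pre_ (no empty sublist)
def groupPhaseA (fuel : Nat) (uf0 : UF) (lst : List (List Int)) : List (List Int) :=
  (lst.foldl (fun (st : UF × PySem.Dict Int CPySet) sublist =>
      let f := ufFind fuel st.1 (PySem.List.pyGetD sublist 0 0)
      let root := f.2
      let groups := if st.2.contains root then st.2 else st.2.insert root CPySet.empty
      let groups := sublist.foldl (fun g elem => g.insert root (CPySet.add (g.getD root CPySet.empty) elem)) groups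
      (f.1, groups)) (uf0, PySem.Dict.empty)).2.values.map CPySet.toList

def group_sublists (lst : List (List Int)) : List (List Int) :=
  let fuel := lst.length * lst.length + 2
  groupPhaseA fuel (unionPassA lst fuel) lst

-- ===== PORT B =====
-- inverted index element -> indices of sublists containing it (index.setdefault(e, []).append(j))
def buildIndex (lst : List (List Int)) : PySem.Dict Int (List Int) :=
  (PySem.List.enumerate lst).foldl (fun ix p =>
    p.2.foldl (fun ix elem => ix.insert elem (ix.getD elem [] ++ [p.1])) ix) PySem.Dict.empty

-- 'while parent[r] != r: r = parent[r]' — parent[r] is getD r r: total stand-in, exact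
-- because every stored parent value is itself a key of the dict
def findRootB : Nat → PySem.Dict Int Int → Int → Int
  | 0, _, r => r
  | fuel + 1, parent, r =>
    let p := parent.getD r r
    if p ≠ r then findRootB fuel parent p else r

-- find(x): setdefault-style insert, then walk up without compression; state = (parent, size)
def ufFindB (fuel : Nat) (st : PySem.Dict Int Int × PySem.Dict Int Int) (x : Int) :
    (PySem.Dict Int Int × PySem.Dict Int Int) × Int :=
  let st := if st.1.contains x then st else (st.1.insert x x, st.2.insert x 1)
  (st, findRootB fuel st.1 x)

-- body of 'if j > i: ra = find(...); rb = find(...); if ra != rb: …' (union by size;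
-- size[ra] / size[rb] are getD _ 0: total stand-ins, exact because roots are keys)
def unionStepB (fuel : Nat) (lst : List (List Int))
    (st : PySem.Dict Int Int × PySem.Dict Int Int) (i j : Int) :
    PySem.Dict Int Int × PySem.Dict Int Int :=
  let fa := ufFindB fuel st (PySem.List.pyGetD (PySem.List.pyGetD lst i []) 0 0)
  let fb := ufFindB fuel fa.1 (PySem.List.pyGetD (PySem.List.pyGetD lst j []) 0 0)
  let st := fb.1
  let ra := fa.2
  let rb := fb.2
  if ra ≠ rb then
    let rr := if st.2.getD ra 0 < st.2.getD rb 0 then (rb, ra) else (ra, rb)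
    (st.1.insert rr.2 rr.1, st.2.insert rr.1 (st.2.getD rr.1 0 + st.2.getD rr.2 0))
  else st

def unionPassB (lst : List (List Int)) (fuel : Nat) : PySem.Dict Int Int × PySem.Dict Int Int :=
  let index := buildIndex lst
  (PySem.List.enumerate lst).foldl (fun st p =>
    -- index[e] never raises: every e of p.2 was indexed in the first pass
    let nb : PySem.Set Int := p.2.foldl (fun nb elem =>
        (index.getD elem []).foldl (fun nb j => PySem.Set.add nb j) nb) PySem.Set.empty
    (PySem.List.sorted nb (fun x => x) false).foldl (fun st j =>
      if j > p.1 then unionStepB fuel lst st p.1 j else st) st)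
    (PySem.Dict.empty, PySem.Dict.empty)

-- 'roots = [find(sub[0]) for sub in lst]', then the grouping loop over zip(roots, lst)
def groupPhaseB (fuel : Nat) (st0 : PySem.Dict Int Int × PySem.Dict Int Int)
    (lst : List (List Int)) : List (List Int) :=
  (((lst.foldl (fun (acc : (PySem.Dict Int Int × PySem.Dict Int Int) × List Int) sub =>
      let f := ufFindB fuel acc.1 (PySem.List.pyGetD sub 0 0)
      (f.1, acc.2 ++ [f.2])) (st0, [])).2.zip lst).foldl (fun (g : PySem.Dict Int CPySet) p =>
      let g := if g.contains p.1 then g else g.insert p.1 CPySet.empty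
      p.2.foldl (fun g e => g.insert p.1 (CPySet.add (g.getD p.1 CPySet.empty) e)) g)
    PySem.Dict.empty).values.map CPySet.toList

def group_sublists_alt (lst : List (List Int)) : List (List Int) :=
  let fuel := lst.length * lst.length + 2
  groupPhaseB fuel (unionPassB lst fuel) lst

-- ===== PRECONDITION & SPEC =====
-- Pre_ excludes exactly the inputs where Python A raises IndexError: a list containing
-- an empty sublist (sublist[0] in step 3; B raises there too).
def Pre_group_sublists (lst : List (List Int)) : Prop := ∀ s ∈ lst, s ≠ []
instance (lst : List (List Int)) : Decidable (Pre_group_sublists lst) := by unfold Pre_group_sublists; infer_instance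
def pvWitness_group_sublists : List (List Int) := [[1, 2], [2, 3], [5]]

def Spec_group_sublists (lst : List (List Int)) (out : List (List Int)) : Prop := out = group_sublists_alt lst
instance (lst : List (List Int)) (out : List (List Int)) : Decidable (Spec_group_sublists lst out) := by unfold Spec_group_sublists; infer_instance

-- ===== CLAIM (what is proved, stated in full; the proofs are below) =====
def Claim_equal_group_sublists : Prop := ∀ (lst : List (List Int)), Dom_group_sublists lst → Pre_group_sublists lst → Spec_group_sublists lst (group_sublists lst)


-- ===== LEMMAS AND PROOFS =====

-- getD-view of a parent dict: non-keys are self-parented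
def pv (p : PySem.Dict Int Int) (x : Int) : Int := p.getD x x

-- abstract union-find invariant: ρ is the root function, d a strictly decreasing
-- depth bound along parent edges, zero at roots
structure UFInv (p : PySem.Dict Int Int) (rho : Int → Int) (d : Int → Nat) : Prop where
  selfRho : ∀ x, pv p x = x → rho x = x
  edgeRho : ∀ x, rho (pv p x) = rho x
  rootRho : ∀ x, pv p (rho x) = rho x
  dec : ∀ x, pv p x ≠ x → d (pv p x) < d x
  dzero : ∀ x, pv p x = x → d x = 0

theorem UFInv.idem {p : PySem.Dict Int Int} {rho : Int → Int} {d : Int → Nat}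
    (h : UFInv p rho d) (x : Int) : rho (rho x) = rho x := by
  have := h.selfRho (rho x) (h.rootRho x); exact this

theorem pv_insert (p : PySem.Dict Int Int) (k v y : Int) :
    pv (p.insert k v) y = if y = k then v else pv p y := by
  simp [pv, PySem.Dict.getD_insert]

-- inserting a self-loop at a non-key leaves the getD-view unchanged
theorem pv_insert_self_not_contains (p : PySem.Dict Int Int) (x : Int)
    (h : p.contains x = false) (y : Int) : pv (p.insert x x) y = pv p y := by
  rw [pv_insert]
  split
  · next he => subst he; simp [pv, PySem.Dict.getD_of_not_contains (h := h)]
  · rfl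

theorem UFInv.congr {p q : PySem.Dict Int Int} {rho : Int → Int} {d : Int → Nat}
    (h : UFInv p rho d) (hpq : ∀ y, pv q y = pv p y) : UFInv q rho d := by
  refine ⟨?_, ?_, ?_, ?_, ?_⟩ <;> intro x <;> simp only [hpq] <;>
    first
      | exact h.selfRho x
      | exact h.edgeRho x
      | exact h.rootRho x
      | exact h.dec x
      | exact h.dzero x

-- compression-free walk to the root
theorem findRootB_spec (fuel : Nat) (p : PySem.Dict Int Int) (rho : Int → Int) (d : Int → Nat)
    (h : UFInv p rho d) (x : Int) (hf : d x < fuel) : findRootB fuel p x = rho x := by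
  induction fuel generalizing x with
  | zero => omega
  | succ fuel ih =>
    rw [findRootB]
    by_cases hpx : pv p x = x
    · simp only [pv] at hpx
      simp [hpx, h.selfRho x (by simpa [pv] using hpx)]
    · have hd := h.dec x hpx
      have hd' : d (p.getD x x) < fuel := by simpa [pv] using (by omega : d (pv p x) < fuel)
      simp only [pv] at hpx
      simp only [if_pos hpx]
      rw [ih _ hd']
      simpa [pv] using h.edgeRho x

-- path compression: re-pointing a non-root x at its root preserves the invariant
theorem compress_inv (p : PySem.Dict Int Int) (rho : Int → Int) (d : Int → Nat)
    (h : UFInv p rho d) (x : Int) (hdx : 0 < d x) :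
    UFInv (p.insert x (rho x)) rho d := by
  have hrx : rho x ≠ x := by
    intro he
    have h1 := h.rootRho x
    rw [he] at h1
    have := h.dzero x h1
    omega
  constructor
  · intro y; rw [pv_insert]; split
    · next he => subst he; intro hx; exact absurd hx hrx
    · exact h.selfRho y
  · intro y; rw [pv_insert]; split
    · next he => subst he; exact h.idem y
    · exact h.edgeRho y
  · intro y; rw [pv_insert]; split
    · next he => rw [← he]; exact h.idem y
    · exact h.rootRho y
  · intro y; rw [pv_insert]; split
    · next he =>
      subst he
      intro _
      have h0 : d (rho y) = 0 := h.dzero _ (h.rootRho y)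
      have h1 : 0 < d y := hdx
      omega
    · exact h.dec y
  · intro y; rw [pv_insert]; split
    · next he => subst he; intro hx; exact absurd hx hrx
    · exact h.dzero y

-- A's recursive find: returns the root and preserves the invariant (same rho, same d)
theorem ufFind_spec (fuel : Nat) (uf : UF) (rho : Int → Int) (d : Int → Nat)
    (h : UFInv uf.parent rho d) (x : Int) (hf : d x < fuel) :
    (ufFind fuel uf x).2 = rho x ∧ UFInv (ufFind fuel uf x).1.parent rho d := by
  induction fuel generalizing uf x with
  | zero => omega
  | succ fuel ih =>
    rw [ufFind]
    have h1 : UFInv (if uf.parent.contains x then uf else ⟨uf.parent.insert x x, uf.rank.insert x 0⟩ : UF).parent rho d := by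
      split
      · exact h
      · next hc =>
        exact h.congr (pv_insert_self_not_contains _ _ (by simpa using hc))
    set uf1 := (if uf.parent.contains x then uf else ⟨uf.parent.insert x x, uf.rank.insert x 0⟩ : UF) with huf1
    by_cases hpx : uf1.parent.getD x x = x
    · simp only [hpx, ne_eq, not_true_eq_false, if_false]
      exact ⟨(h1.selfRho x hpx).symm ▸ rfl, h1⟩
    · have hd : d (pv uf1.parent x) < d x := h1.dec x (by simpa [pv] using hpx)
      have hdx : 0 < d x := by omega
      have hd2 : d (uf1.parent.getD x x) < d x := by simpa [pv] using hd
      have hf' : d (uf1.parent.getD x x) < fuel := by omega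
      obtain ⟨hr2, hrinv⟩ := ih uf1 h1 (uf1.parent.getD x x) hf'
      have hrho : rho (uf1.parent.getD x x) = rho x := h1.edgeRho x
      simp only [ne_eq, hpx, not_false_eq_true, if_true]
      constructor
      · simp [PySem.Dict.getD_insert_self, hr2, hrho]
      · have : (ufFind fuel uf1 (uf1.parent.getD x x)).2 = rho x := by rw [hr2, hrho]
        rw [this]
        exact compress_inv _ rho d hrinv x hdx

-- B's find: setdefault insert + walk; preserves the invariant
theorem ufFindB_spec (fuel : Nat) (st : PySem.Dict Int Int × PySem.Dict Int Int)
    (rho : Int → Int) (d : Int → Nat) (h : UFInv st.1 rho d) (x : Int) (hf : d x < fuel) :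
    (ufFindB fuel st x).2 = rho x ∧ UFInv (ufFindB fuel st x).1.1 rho d := by
  rw [ufFindB]
  have hinv : UFInv (if st.1.contains x then st else (st.1.insert x x, st.2.insert x 1)).1 rho d := by
    split
    · exact h
    · next hc => exact h.congr (pv_insert_self_not_contains _ _ (by simpa using hc))
  exact ⟨findRootB_spec fuel _ rho d hinv x hf, hinv⟩

-- the merged root function and depth bound after attaching root r1 := rho u under r2 := rho v
def mergeRho (rho : Int → Int) (u v z : Int) : Int := if rho z = rho u then rho v else rho z
def mergeD (rho : Int → Int) (d : Int → Nat) (u z : Int) : Nat := if rho z = rho u then d z + 1 else d z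

-- the equivalence produced by joining the classes of u and v
def JoinEq (rho : Int → Int) (u v a c : Int) : Prop :=
  rho a = rho c ∨ (rho a = rho u ∧ rho c = rho v) ∨ (rho a = rho v ∧ rho c = rho u)

theorem attach_inv (p : PySem.Dict Int Int) (rho : Int → Int) (d : Int → Nat)
    (h : UFInv p rho d) (u v : Int) (hne : rho u ≠ rho v) :
    UFInv (p.insert (rho u) (rho v)) (mergeRho rho u v) (mergeD rho d u) := by
  have hvu : rho (rho v) ≠ rho u := by rw [h.idem v]; exact fun hh => hne hh.symm
  constructor
  · intro y; rw [pv_insert]; split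
    · next he => intro hx; exact absurd (hx.trans he) (fun hh => hne hh.symm)
    · next hyne =>
      intro hx
      have hy := h.selfRho y hx
      unfold mergeRho
      rw [if_neg (show ¬rho y = rho u by rw [hy]; exact hyne)]
      exact hy
  · intro y; rw [pv_insert]; split
    · next he =>
      subst he
      unfold mergeRho
      rw [if_neg hvu, if_pos (h.idem u), h.idem v]
    · next hyne =>
      unfold mergeRho
      rw [h.edgeRho y]
  · intro y; rw [pv_insert]; unfold mergeRho
    by_cases hy : rho y = rho u
    · rw [if_pos hy, if_neg (show ¬rho v = rho u from fun hh => hne hh.symm), h.rootRho v]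
    · rw [if_neg hy, if_neg hy, h.rootRho y]
  · intro y; rw [pv_insert]; split
    · next he =>
      subst he
      intro _
      unfold mergeD
      rw [if_neg hvu, if_pos (h.idem u)]
      have h0 : d (rho v) = 0 := h.dzero _ (h.rootRho v)
      omega
    · next hyne =>
      intro hx
      have hdy := h.dec y hx
      unfold mergeD
      rw [h.edgeRho y]
      by_cases hy : rho y = rho u
      · rw [if_pos hy, if_pos hy]; omega
      · rw [if_neg hy, if_neg hy]; omega
  · intro y; rw [pv_insert]; split
    · next he => intro hx; exact absurd (hx.trans he) (fun hh => hne hh.symm)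
    · next hyne =>
      intro hx
      have hy := h.selfRho y hx
      unfold mergeD
      rw [if_neg (show ¬rho y = rho u by rw [hy]; exact hyne)]
      exact h.dzero y hx

theorem mergeRho_eqv (rho : Int → Int) (u v : Int) (a c : Int) :
    (mergeRho rho u v a = mergeRho rho u v c) ↔ JoinEq rho u v a c := by
  unfold mergeRho JoinEq
  by_cases ha : rho a = rho u <;> by_cases hc : rho c = rho u
  · rw [if_pos ha, if_pos hc]
    exact ⟨fun _ => Or.inl (ha.trans hc.symm), fun _ => rfl⟩
  · rw [if_pos ha, if_neg hc]
    constructor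
    · intro hh; exact Or.inr (Or.inl ⟨ha, hh.symm⟩)
    · rintro (hh | ⟨_, hh⟩ | ⟨_, hh⟩)
      · exact absurd (hh ▸ ha : rho c = rho u) hc
      · exact hh.symm
      · exact absurd hh hc
  · rw [if_neg ha, if_pos hc]
    constructor
    · intro hh; exact Or.inr (Or.inr ⟨hh, hc⟩)
    · rintro (hh | ⟨hh, _⟩ | ⟨hh, _⟩)
      · exact absurd (hh.symm ▸ hc : rho a = rho u) ha
      · exact absurd hh ha
      · exact hh
  · rw [if_neg ha, if_neg hc]
    constructor
    · exact Or.inl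
    · rintro (hh | ⟨hh, _⟩ | ⟨_, hh⟩)
      · exact hh
      · exact absurd hh ha
      · exact absurd hh hc

theorem JoinEq_comm (rho : Int → Int) (u v a c : Int) :
    JoinEq rho u v a c ↔ JoinEq rho v u a c := by
  unfold JoinEq; tauto

-- A's union: merges the classes of x and y, any rank orientation
theorem ufUnion_spec (fuel : Nat) (uf : UF) (rho : Int → Int) (d : Int → Nat) (b : Nat)
    (x y : Int) (h : UFInv uf.parent rho d) (hb : ∀ z, d z ≤ b) (hf : b < fuel) :
    ∃ rho' d', UFInv (ufUnion fuel uf x y).parent rho' d' ∧ (∀ z, d' z ≤ b + 1) ∧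
      (∀ a c, (rho' a = rho' c) ↔ JoinEq rho x y a c) := by
  obtain ⟨hx2, hxinv⟩ := ufFind_spec fuel uf rho d h x (lt_of_le_of_lt (hb x) hf)
  obtain ⟨hy2, hyinv⟩ := ufFind_spec fuel (ufFind fuel uf x).1 rho d hxinv y (lt_of_le_of_lt (hb y) hf)
  unfold ufUnion
  simp only [hx2, hy2]
  by_cases hxy : rho x = rho y
  · rw [if_pos hxy]
    refine ⟨rho, d, hyinv, fun z => le_trans (hb z) (by omega), fun a c => ?_⟩
    unfold JoinEq
    constructor
    · exact Or.inl
    · rintro (hh | ⟨h1, h2⟩ | ⟨h1, h2⟩)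
      · exact hh
      · rw [h1, h2, hxy]
      · rw [h1, h2, hxy]
  · rw [if_neg hxy]
    split
    · refine ⟨mergeRho rho y x, mergeD rho d y,
        attach_inv _ rho d hyinv y x (fun hh => hxy hh.symm), fun z => ?_, fun a c => ?_⟩
      · unfold mergeD; split <;> [exact Nat.add_le_add_right (hb z) 1; exact le_trans (hb z) (by omega)]
      · rw [mergeRho_eqv, JoinEq_comm]
    · split
      · refine ⟨mergeRho rho x y, mergeD rho d x,
          attach_inv _ rho d hyinv x y hxy, fun z => ?_, fun a c => ?_⟩
        · unfold mergeD; split <;> [exact Nat.add_le_add_right (hb z) 1; exact le_trans (hb z) (by omega)]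
        · rw [mergeRho_eqv]
      · refine ⟨mergeRho rho x y, mergeD rho d x,
          attach_inv _ rho d hyinv x y hxy, fun z => ?_, fun a c => ?_⟩
        · unfold mergeD; split <;> [exact Nat.add_le_add_right (hb z) 1; exact le_trans (hb z) (by omega)]
        · rw [mergeRho_eqv]

-- B's union step: same classes merged, any size orientation
theorem unionStepB_spec (fuel : Nat) (lst : List (List Int))
    (st : PySem.Dict Int Int × PySem.Dict Int Int) (i j : Int)
    (rho : Int → Int) (d : Int → Nat) (b : Nat)
    (h : UFInv st.1 rho d) (hb : ∀ z, d z ≤ b) (hf : b < fuel) :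
    ∃ rho' d', UFInv (unionStepB fuel lst st i j).1 rho' d' ∧ (∀ z, d' z ≤ b + 1) ∧
      (∀ a c, (rho' a = rho' c) ↔
        JoinEq rho (PySem.List.pyGetD (PySem.List.pyGetD lst i []) 0 0)
                   (PySem.List.pyGetD (PySem.List.pyGetD lst j []) 0 0) a c) := by
  obtain ⟨hx2, hxinv⟩ := ufFindB_spec fuel st rho d h
    (PySem.List.pyGetD (PySem.List.pyGetD lst i []) 0 0)
    (lt_of_le_of_lt (hb _) hf)
  obtain ⟨hy2, hyinv⟩ := ufFindB_spec fuel (ufFindB fuel st (PySem.List.pyGetD (PySem.List.pyGetD lst i []) 0 0)).1 rho d hxinv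
    (PySem.List.pyGetD (PySem.List.pyGetD lst j []) 0 0)
    (lt_of_le_of_lt (hb _) hf)
  unfold unionStepB
  simp only [hx2, hy2]
  set xa := PySem.List.pyGetD (PySem.List.pyGetD lst i []) 0 0 with hxa
  set xb := PySem.List.pyGetD (PySem.List.pyGetD lst j []) 0 0 with hxb
  by_cases hxy : rho xa = rho xb
  · rw [if_neg (by simpa using hxy)]
    refine ⟨rho, d, hyinv, fun z => le_trans (hb z) (by omega), fun a c => ?_⟩
    unfold JoinEq
    constructor
    · exact Or.inl
    · rintro (hh | ⟨h1, h2⟩ | ⟨h1, h2⟩)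
      · exact hh
      · rw [h1, h2, hxy]
      · rw [h1, h2, hxy]
  · rw [if_pos (by simpa using hxy)]
    split
    · refine ⟨mergeRho rho xa xb, mergeD rho d xa,
        by exact attach_inv _ rho d hyinv xa xb hxy, fun z => ?_, fun a c => ?_⟩
      · unfold mergeD; split <;> [exact Nat.add_le_add_right (hb z) 1; exact le_trans (hb z) (by omega)]
      · rw [mergeRho_eqv]
    · refine ⟨mergeRho rho xb xa, mergeD rho d xb,
        by exact attach_inv _ rho d hyinv xb xa (fun hh => hxy hh.symm), fun z => ?_, fun a c => ?_⟩
      · unfold mergeD; split <;> [exact Nat.add_le_add_right (hb z) 1; exact le_trans (hb z) (by omega)]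
      · rw [mergeRho_eqv, JoinEq_comm]

-- the two union-find states viewed abstractly: both partitions coincide
def Couple (uf : UF) (st : PySem.Dict Int Int × PySem.Dict Int Int) (b : Nat) : Prop :=
  ∃ rhoA dA rhoB dB, UFInv uf.parent rhoA dA ∧ UFInv st.1 rhoB dB ∧
    (∀ z, dA z ≤ b) ∧ (∀ z, dB z ≤ b) ∧ (∀ a c, (rhoA a = rhoA c) ↔ (rhoB a = rhoB c))

theorem coupled_fold (fuel : Nat) (lst : List (List Int)) (P : List (Int × Int))
    (uf : UF) (st : PySem.Dict Int Int × PySem.Dict Int Int) (b : Nat)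
    (h : Couple uf st b) (hf : b + P.length < fuel) :
    Couple (P.foldl (fun uf p => ufUnion fuel uf
              (PySem.List.pyGetD (PySem.List.pyGetD lst p.1 []) 0 0)
              (PySem.List.pyGetD (PySem.List.pyGetD lst p.2 []) 0 0)) uf)
           (P.foldl (fun st p => unionStepB fuel lst st p.1 p.2) st) (b + P.length) := by
  induction P generalizing uf st b with
  | nil => simpa using h
  | cons p P ih =>
    obtain ⟨rhoA, dA, rhoB, dB, hA, hB, hbA, hbB, hcpl⟩ := h
    simp only [List.length_cons] at hf
    obtain ⟨rhoA', dA', hA', hbA', heA⟩ :=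
      ufUnion_spec fuel uf rhoA dA b
        (PySem.List.pyGetD (PySem.List.pyGetD lst p.1 []) 0 0)
        (PySem.List.pyGetD (PySem.List.pyGetD lst p.2 []) 0 0) hA hbA (by omega)
    obtain ⟨rhoB', dB', hB', hbB', heB⟩ :=
      unionStepB_spec fuel lst st p.1 p.2 rhoB dB b hB hbB (by omega)
    have hcpl' : ∀ a c, (rhoA' a = rhoA' c) ↔ (rhoB' a = rhoB' c) := by
      intro a c
      rw [heA, heB]
      unfold JoinEq
      simp only [hcpl]
    have := ih _ _ (b + 1) ⟨rhoA', dA', rhoB', dB', hA', hB', hbA', hbB', hcpl'⟩ (by omega)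
    simp only [List.foldl_cons, List.length_cons]
    have harith : b + (P.length + 1) = (b + 1) + P.length := by omega
    rw [harith]
    exact this

-- A's test for the pair (i, j): some element of lst[i] lies in lst[j]
def paB (lst : List (List Int)) (i j : Int) : Bool :=
  ((PySem.List.pyGetD lst i []).find? (fun e => (PySem.List.pyGetD lst j []).contains e)).isSome

-- B's test: j is indexed under some element of lst[i]
def qbB (lst : List (List Int)) (i j : Int) : Bool :=
  (PySem.List.pyGetD lst i []).any (fun e => ((buildIndex lst).getD e []).contains j)

-- the common sequence of pairs both passes call union on
def pairsIdx (lst : List (List Int)) : List (Int × Int) :=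
  (PySem.List.pyRange 0 (lst.length : Int)).flatMap (fun i =>
    ((PySem.List.pyRange (i + 1) (lst.length : Int)).filter (paB lst i)).map (fun j => (i, j)))

theorem mem_foldl_setAdd (js : List Int) (nb : PySem.Set Int) (x : Int) :
    x ∈ js.foldl (fun nb j => PySem.Set.add nb j) nb ↔ x ∈ nb ∨ x ∈ js := by
  induction js generalizing nb with
  | nil => simp
  | cons a l ih => simp only [List.foldl_cons, ih, PySem.Set.mem_add, List.mem_cons]; tauto

theorem nodup_foldl_setAdd (js : List Int) (nb : PySem.Set Int) (h : nb.Nodup) :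
    (js.foldl (fun nb j => PySem.Set.add nb j) nb).Nodup := by
  induction js generalizing nb with
  | nil => exact h
  | cons a l ih => exact ih _ (PySem.Set.nodup_add _ _ h)

theorem mem_nbFold (sub : List Int) (g : Int → List Int) (nb : PySem.Set Int) (x : Int) :
    x ∈ sub.foldl (fun nb e => (g e).foldl (fun nb j => PySem.Set.add nb j) nb) nb ↔
      x ∈ nb ∨ ∃ e ∈ sub, x ∈ g e := by
  induction sub generalizing nb with
  | nil => simp
  | cons a l ih =>
    simp only [List.foldl_cons, ih, mem_foldl_setAdd, List.mem_cons]
    constructor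
    · rintro ((h | h) | ⟨e, he, hx⟩)
      · exact Or.inl h
      · exact Or.inr ⟨a, Or.inl rfl, h⟩
      · exact Or.inr ⟨e, Or.inr he, hx⟩
    · rintro (h | ⟨e, (rfl | he), hx⟩)
      · exact Or.inl (Or.inl h)
      · exact Or.inl (Or.inr hx)
      · exact Or.inr ⟨e, he, hx⟩

theorem nodup_nbFold (sub : List Int) (g : Int → List Int) (nb : PySem.Set Int) (h : nb.Nodup) :
    (sub.foldl (fun nb e => (g e).foldl (fun nb j => PySem.Set.add nb j) nb) nb).Nodup := by
  induction sub generalizing nb with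
  | nil => exact h
  | cons a l ih => exact ih _ (nodup_foldl_setAdd _ _ h)

theorem getD_indexInner (sub : List Int) (i : Int) (ix : PySem.Dict Int (List Int)) (e j : Int) :
    j ∈ (sub.foldl (fun ix elem => ix.insert elem (ix.getD elem [] ++ [i])) ix).getD e [] ↔
      j ∈ ix.getD e [] ∨ (j = i ∧ e ∈ sub) := by
  induction sub generalizing ix with
  | nil => simp
  | cons a l ih =>
    simp only [List.foldl_cons, ih, PySem.Dict.getD_insert, List.mem_cons]
    by_cases h : e = a
    all_goals simp [h]
    all_goals tauto

theorem mem_getD_buildIndexAux (lst : List (List Int)) (s : Int) (d : PySem.Dict Int (List Int)) (e j : Int) :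
    j ∈ ((PySem.List.enumerate lst s).foldl
          (fun ix p => p.2.foldl (fun ix elem => ix.insert elem (ix.getD elem [] ++ [p.1])) ix) d).getD e [] ↔
      j ∈ d.getD e [] ∨ ∃ k : Nat, ∃ _ : k < lst.length, j = s + k ∧ e ∈ lst[k] := by
  induction lst generalizing s d with
  | nil => simp [PySem.List.enumerate_nil]
  | cons a l ih =>
    rw [PySem.List.enumerate_cons]
    simp only [List.foldl_cons, ih, getD_indexInner, List.length_cons]
    constructor
    · rintro ((hd | ⟨rfl, he⟩) | ⟨k, hk, rfl, he⟩)
      · exact Or.inl hd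
      · exact Or.inr ⟨0, by omega, by simp, by simpa⟩
      · exact Or.inr ⟨k + 1, by omega, by push_cast; ring, by simpa⟩
    · rintro (hd | ⟨k, hk, rfl, he⟩)
      · exact Or.inl (Or.inl hd)
      · cases k with
        | zero => exact Or.inl (Or.inr ⟨by simp, by simpa using he⟩)
        | succ k => exact Or.inr ⟨k, by omega, by push_cast; ring, by simpa using he⟩

theorem mem_getD_buildIndex (lst : List (List Int)) (e j : Int) :
    j ∈ (buildIndex lst).getD e [] ↔ ∃ k : Nat, ∃ _ : k < lst.length, j = k ∧ e ∈ lst[k] := by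
  unfold buildIndex
  rw [mem_getD_buildIndexAux]
  simp [PySem.Dict.getD_empty]

theorem index_bounds (lst : List (List Int)) (e j : Int) (h : j ∈ (buildIndex lst).getD e []) :
    0 ≤ j ∧ j < (lst.length : Int) := by
  obtain ⟨k, hk, rfl, -⟩ := (mem_getD_buildIndex lst e j).mp h
  omega

theorem sorted_nb_eq (lst : List (List Int)) (i : Int) :
    PySem.List.sorted ((PySem.List.pyGetD lst i []).foldl (fun nb elem =>
        ((buildIndex lst).getD elem []).foldl (fun nb j => PySem.Set.add nb j) nb) PySem.Set.empty)
      (fun x => x) =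
      (PySem.List.pyRange 0 (lst.length : Int)).filter (qbB lst i) := by
  apply PySem.List.sorted_eq_of_perm_of_pairwise_lt
  · refine (List.perm_ext_iff_of_nodup ((PySem.List.nodup_pyRange_one _ _).filter _)
        (nodup_nbFold _ _ _ List.nodup_nil)).mpr ?_
    intro a
    rw [List.mem_filter, mem_nbFold]
    unfold qbB
    simp only [List.any_eq_true, List.contains_iff_mem, PySem.List.mem_pyRange_one,
      List.mem_nil_iff, false_or]
    constructor
    · rintro ⟨-, e, he, hj⟩; exact ⟨e, he, hj⟩
    · rintro ⟨e, he, hj⟩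
      exact ⟨⟨(index_bounds lst e a hj).1, (index_bounds lst e a hj).2⟩, e, he, hj⟩
  · exact (PySem.List.pairwise_lt_pyRange_one _ _).filter _

theorem qb_eq_pa (lst : List (List Int)) (i j : Int) (h0 : 0 ≤ j) (h1 : j < (lst.length : Int)) :
    qbB lst i j = paB lst i j := by
  unfold qbB paB
  rw [Bool.eq_iff_iff, List.any_eq_true, List.find?_isSome]
  have hj : PySem.List.pyGetD lst j [] = lst[j.toNat]'(by omega) :=
    PySem.List.pyGetD_eq_getElem lst [] h0 h1
  constructor
  · rintro ⟨e, he, hc⟩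
    refine ⟨e, he, ?_⟩
    rw [List.contains_iff_mem] at hc ⊢
    obtain ⟨k, hk, hjk, hek⟩ := (mem_getD_buildIndex lst e j).mp hc
    rw [hj]
    have : k = j.toNat := by omega
    subst this; exact hek
  · rintro ⟨e, he, hc⟩
    refine ⟨e, he, ?_⟩
    rw [List.contains_iff_mem] at hc ⊢
    refine (mem_getD_buildIndex lst e j).mpr ⟨j.toNat, by omega, by omega, ?_⟩
    rw [hj] at hc; exact hc

theorem filtered_lists_eq (lst : List (List Int)) (i : Int) (h0 : 0 ≤ i) (h1 : i < (lst.length : Int)) :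
    ((PySem.List.pyRange 0 (lst.length : Int)).filter (qbB lst i)).filter (fun j => decide (i < j))
      = (PySem.List.pyRange (i + 1) (lst.length : Int)).filter (paB lst i) := by
  rw [List.filter_filter]
  rw [PySem.List.pyRange_one_append 0 (i + 1) (lst.length : Int) (by omega) (by omega),
      List.filter_append]
  have hleft : (PySem.List.pyRange 0 (i + 1)).filter (fun a => decide (i < a) && qbB lst i a) = [] := by
    rw [List.filter_eq_nil_iff]
    intro j hj
    have hb := PySem.List.mem_pyRange_one.mp hj
    simp only [Bool.and_eq_true, decide_eq_true_eq, not_and]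
    omega
  rw [hleft, List.nil_append]
  apply List.filter_congr
  intro j hj
  have hb := PySem.List.mem_pyRange_one.mp hj
  rw [qb_eq_pa lst i j (by omega) (by omega)]
  rw [Bool.eq_iff_iff]
  simp only [Bool.and_eq_true, decide_eq_true_eq]
  constructor
  · rintro ⟨-, hq⟩; exact hq
  · intro hq; exact ⟨by omega, hq⟩

-- A's pass is the union fold over the common pair sequence
theorem passA_eq (lst : List (List Int)) (fuel : Nat) :
    unionPassA lst fuel = (pairsIdx lst).foldl (fun uf p => ufUnion fuel uf
        (PySem.List.pyGetD (PySem.List.pyGetD lst p.1 []) 0 0)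
        (PySem.List.pyGetD (PySem.List.pyGetD lst p.2 []) 0 0))
      ⟨PySem.Dict.empty, PySem.Dict.empty⟩ := by
  unfold unionPassA pairsIdx
  rw [List.foldl_flatMap]
  apply PySem.List.foldl_congr_mem
  intro uf i hi
  rw [List.foldl_map, List.foldl_filter]
  apply PySem.List.foldl_congr_mem
  intro acc j hj
  cases h : (PySem.List.pyGetD lst i []).find? (fun e => (PySem.List.pyGetD lst j []).contains e) with
  | none => unfold paB; rw [h]; simp
  | some v => unfold paB; rw [h]; simp

-- B's pass is the same fold
theorem passB_eq (lst : List (List Int)) (fuel : Nat) :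
    unionPassB lst fuel = (pairsIdx lst).foldl (fun st p => unionStepB fuel lst st p.1 p.2)
      (PySem.Dict.empty, PySem.Dict.empty) := by
  unfold unionPassB pairsIdx
  rw [List.foldl_flatMap, PySem.List.enumerate_eq_map_pyRange lst [], List.foldl_map]
  simp only [PySem.List.len_eq]
  apply PySem.List.foldl_congr_mem
  intro st i hi
  obtain ⟨hi0, hi1⟩ := PySem.List.mem_pyRange_one.mp hi
  rw [List.foldl_map, sorted_nb_eq lst i, ← filtered_lists_eq lst i hi0 hi1, List.filter_filter]
  rw [List.foldl_filter, List.foldl_filter]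
  apply PySem.List.foldl_congr_mem
  intro acc j hj
  by_cases hij : i < j
  · simp [hij]
  · simp [hij]

-- ---- grouping phase: both ports reduce to the same pure dict-building fold ----

def rawStep (g : PySem.Dict Int CPySet) (p : Int × List Int) : PySem.Dict Int CPySet :=
  let g1 := if g.contains p.1 then g else g.insert p.1 CPySet.empty
  p.2.foldl (fun g e => g.insert p.1 (CPySet.add (g.getD p.1 CPySet.empty) e)) g1

def gStep (g : PySem.Dict Int CPySet) (p : Int × List Int) : PySem.Dict Int CPySet :=
  g.insert p.1 (p.2.foldl CPySet.add (g.getD p.1 CPySet.empty))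

theorem innerFold (k : Int) (es : List Int) (g : PySem.Dict Int CPySet) :
    es.foldl (fun g e => g.insert k (CPySet.add (g.getD k CPySet.empty) e)) g =
      if es = [] then g else g.insert k (es.foldl CPySet.add (g.getD k CPySet.empty)) := by
  induction es generalizing g with
  | nil => simp
  | cons e t ih =>
    rw [List.foldl_cons, ih]
    split
    · next ht => subst ht; simp
    · next ht =>
      rw [if_neg (by simp)]
      rw [PySem.Dict.getD_insert_self, PySem.Dict.insert_insert_self, List.foldl_cons]

theorem insert_getD_self (g : PySem.Dict Int CPySet) (k : Int)
    (hc : g.contains k = true) (hnd : g.keys.Nodup) :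
    g.insert k (g.getD k CPySet.empty) = g := by
  apply PySem.Dict.ext
  rw [PySem.Dict.items_insert_of_contains (h := hc)]
  conv_rhs => rw [← List.map_id g.items]
  apply List.map_congr_left
  rintro ⟨a, b⟩ hp
  by_cases hk : a = k
  · subst hk
    have hget : g.getD a CPySet.empty = b := PySem.Dict.getD_of_mem_items g hp hnd CPySet.empty
    simp [hget]
  · simp [hk]

theorem rawStep_eq_gStep (g : PySem.Dict Int CPySet) (p : Int × List Int)
    (hnd : g.keys.Nodup) : rawStep g p = gStep g p := by
  unfold rawStep gStep
  cases hc : g.contains p.1 with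
  | true =>
    simp only [if_true]
    rw [innerFold]
    split
    · next he => rw [he, List.foldl_nil, insert_getD_self g p.1 hc hnd]
    · rfl
  | false =>
    simp only [Bool.false_eq_true, if_false]
    rw [innerFold]
    have hd0 : g.getD p.1 CPySet.empty = CPySet.empty :=
      PySem.Dict.getD_of_not_contains g CPySet.empty hc
    split
    · next he => rw [he, List.foldl_nil, hd0]
    · rw [PySem.Dict.getD_insert_self, PySem.Dict.insert_insert_self, hd0]

theorem rawFold_eq_gBuild (ps : List (Int × List Int)) (g : PySem.Dict Int CPySet)
    (hnd : g.keys.Nodup) : ps.foldl rawStep g = ps.foldl gStep g := by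
  induction ps generalizing g with
  | nil => rfl
  | cons p t ih =>
    rw [List.foldl_cons, List.foldl_cons, rawStep_eq_gStep g p hnd]
    exact ih _ (PySem.Dict.nodup_keys_insert _ _ _ hnd)

-- A's grouping loop, with the state-threading finds abstracted away
theorem groupA_fold (fuel : Nat) (rho : Int → Int) (d : Int → Nat)
    (lst : List (List Int)) (uf : UF) (g : PySem.Dict Int CPySet)
    (h : UFInv uf.parent rho d) (hf : ∀ z, d z < fuel) :
    (lst.foldl (fun (st : UF × PySem.Dict Int CPySet) sublist =>
      let f := ufFind fuel st.1 (PySem.List.pyGetD sublist 0 0)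
      let root := f.2
      let groups := if st.2.contains root then st.2 else st.2.insert root CPySet.empty
      let groups := sublist.foldl (fun g elem => g.insert root (CPySet.add (g.getD root CPySet.empty) elem)) groups
      (f.1, groups)) (uf, g)).2 =
    (lst.map (fun s => (rho (PySem.List.pyGetD s 0 0), s))).foldl rawStep g := by
  induction lst generalizing uf g with
  | nil => rfl
  | cons sub t ih =>
    obtain ⟨h2, hinv⟩ := ufFind_spec fuel uf rho d h (PySem.List.pyGetD sub 0 0) (hf _)
    simp only [List.foldl_cons, List.map_cons, h2]
    rw [ih _ _ hinv]
    rfl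

-- B's roots comprehension, abstracted
theorem groupB_roots (fuel : Nat) (rho : Int → Int) (d : Int → Nat)
    (lst : List (List Int)) (st : PySem.Dict Int Int × PySem.Dict Int Int) (rs : List Int)
    (h : UFInv st.1 rho d) (hf : ∀ z, d z < fuel) :
    (lst.foldl (fun (acc : (PySem.Dict Int Int × PySem.Dict Int Int) × List Int) sub =>
      let f := ufFindB fuel acc.1 (PySem.List.pyGetD sub 0 0)
      (f.1, acc.2 ++ [f.2])) (st, rs)).2 =
    rs ++ lst.map (fun s => rho (PySem.List.pyGetD s 0 0)) := by
  induction lst generalizing st rs with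
  | nil => simp
  | cons sub t ih =>
    obtain ⟨h2, hinv⟩ := ufFindB_spec fuel st rho d h (PySem.List.pyGetD sub 0 0) (hf _)
    simp only [List.foldl_cons, List.map_cons, h2]
    rw [ih _ _ hinv]
    simp

-- the set accumulated for key k over a keyed pair list
def phiKey (ps : List (Int × List Int)) (k : Int) : CPySet :=
  ((ps.filter (fun p => p.1 == k)).flatMap (fun p => p.2)).foldl CPySet.add CPySet.empty

theorem phiKey_append (ps : List (Int × List Int)) (p : Int × List Int) (k : Int) :
    phiKey (ps ++ [p]) k =
      if p.1 = k then p.2.foldl CPySet.add (phiKey ps k) else phiKey ps k := by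
  unfold phiKey
  rw [List.filter_append]
  by_cases hk : p.1 = k
  · rw [if_pos hk]
    simp only [List.filter_cons, List.filter_nil, hk, beq_self_eq_true, if_true]
    rw [List.flatMap_append, List.foldl_append]
    simp
  · rw [if_neg hk]
    simp only [List.filter_cons, List.filter_nil]
    rw [if_neg (by simpa using hk)]
    simp

theorem phiKey_not_mem (ps : List (Int × List Int)) (k : Int)
    (h : k ∉ ps.map (fun p => p.1)) : phiKey ps k = CPySet.empty := by
  unfold phiKey
  have : ps.filter (fun p => p.1 == k) = [] := by
    rw [List.filter_eq_nil_iff]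
    rintro p hp
    simp only [beq_iff_eq]
    intro he
    exact h (List.mem_map.mpr ⟨p, hp, he⟩)
  rw [this]
  rfl

theorem gStep_apply (g : PySem.Dict Int CPySet) (p : Int × List Int) :
    gStep g p = g.insert p.1 (p.2.foldl CPySet.add (g.getD p.1 CPySet.empty)) := rfl

theorem gBuild_items (ps : List (Int × List Int)) :
    (ps.foldl gStep PySem.Dict.empty).items =
      (PySem.Set.ofList (ps.map (fun p => p.1))).map (fun k => (k, phiKey ps k)) := by
  induction ps using List.reverseRecOn with
  | nil => rfl
  | append_singleton ps p ih =>
    rw [List.foldl_append, List.foldl_cons, List.foldl_nil]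
    have hkeys : (ps.foldl gStep PySem.Dict.empty).keys = PySem.Set.ofList (ps.map (fun p => p.1)) := by
      simp only [PySem.Dict.keys, ih, List.map_map]
      exact List.map_id _
    have hnd : (ps.foldl gStep PySem.Dict.empty).keys.Nodup := by
      rw [hkeys]; exact PySem.Set.nodup_ofList _
    have hofl : PySem.Set.ofList ((ps ++ [p]).map (fun p => p.1)) =
        PySem.Set.add (PySem.Set.ofList (ps.map (fun p => p.1))) p.1 := by
      rw [List.map_append, PySem.Set.ofList_eq_foldl, PySem.Set.ofList_eq_foldl, List.foldl_append]
      simp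
    have hgetD : (ps.foldl gStep PySem.Dict.empty).getD p.1 CPySet.empty = phiKey ps p.1 := by
      by_cases hm : p.1 ∈ ps.map (fun p => p.1)
      · exact PySem.Dict.getD_of_mem_items _ (by
          rw [ih]
          exact List.mem_map.mpr ⟨p.1, (PySem.Set.mem_ofList _ _).mpr hm, rfl⟩) hnd CPySet.empty
      · rw [PySem.Dict.getD_of_not_contains _ CPySet.empty (by
          rw [PySem.Dict.contains_eq_decide_mem_keys, hkeys]
          simp [PySem.Set.mem_ofList _ _, hm]), phiKey_not_mem ps p.1 hm]
    rw [gStep_apply, hgetD, hofl]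
    by_cases hm : p.1 ∈ ps.map (fun p => p.1)
    · have hc : (ps.foldl gStep PySem.Dict.empty).contains p.1 = true := by
        rw [PySem.Dict.contains_eq_decide_mem_keys, hkeys]
        simp [PySem.Set.mem_ofList _ _, hm]
      rw [PySem.Dict.items_insert_of_contains (h := hc), ih,
          PySem.Set.add_of_mem ((PySem.Set.mem_ofList _ _).mpr hm), List.map_map]
      apply List.map_congr_left
      intro k hk
      simp only [Function.comp_apply]
      by_cases hkp : k = p.1
      · subst hkp
        rw [if_pos (by simp), phiKey_append, if_pos rfl]
      · simp only [beq_iff_eq]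
        rw [if_neg hkp, phiKey_append, if_neg (fun hh => hkp hh.symm)]
    · have hc : (ps.foldl gStep PySem.Dict.empty).contains p.1 = false := by
        rw [PySem.Dict.contains_eq_decide_mem_keys, hkeys]
        simp [PySem.Set.mem_ofList _ _, hm]
      rw [PySem.Dict.items_insert_of_not_contains (h := hc), ih,
          PySem.Set.add_of_not_mem (fun hmem => hm ((PySem.Set.mem_ofList _ _).mp hmem)),
          List.map_append]
      congr 1
      · apply List.map_congr_left
        intro k hk
        rw [phiKey_append, if_neg (fun hh : p.1 = k => hm (hh ▸ (PySem.Set.mem_ofList _ _).mp hk))]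
      · simp [phiKey_append]

theorem gBuild_values (ps : List (Int × List Int)) :
    (ps.foldl gStep PySem.Dict.empty).values =
      (PySem.Set.ofList (ps.map (fun p => p.1))).map (phiKey ps) := by
  simp only [PySem.Dict.values, gBuild_items, List.map_map]
  rfl

-- two key functions with the same equality pattern build the same values list
theorem foldadd_congr (kA kB : List Int → Int) (FA FB : Int → CPySet)
    (hpat : ∀ s s', (kA s = kA s') ↔ (kB s = kB s')) :
    ∀ (l : List (List Int)) (zs : List (Int × Int)),
      (∀ p ∈ zs, ∀ s : List Int, (p.1 = kA s) ↔ (p.2 = kB s)) →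
      (∀ p ∈ zs, FA p.1 = FB p.2) →
      (∀ s ∈ l, FA (kA s) = FB (kB s)) →
      ((l.foldl (fun t x => PySem.Set.add t (kA x)) (zs.map Prod.fst)).map FA)
        = ((l.foldl (fun t x => PySem.Set.add t (kB x)) (zs.map Prod.snd)).map FB) := by
  intro l
  induction l with
  | nil =>
    intro zs h1 h2 _
    simp only [List.foldl_nil, List.map_map]
    exact List.map_congr_left h2
  | cons s0 t ih =>
    intro zs h1 h2 hl
    simp only [List.foldl_cons]
    by_cases hm : kA s0 ∈ zs.map Prod.fst
    · have hmB : kB s0 ∈ zs.map Prod.snd := by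
        obtain ⟨p, hp, hpe⟩ := List.mem_map.mp hm
        exact List.mem_map.mpr ⟨p, hp, (h1 p hp s0).mp hpe⟩
      rw [PySem.Set.add_of_mem hm, PySem.Set.add_of_mem hmB]
      exact ih zs h1 h2 (fun s hs => hl s (List.mem_cons_of_mem _ hs))
    · have hmB : kB s0 ∉ zs.map Prod.snd := by
        intro hc
        obtain ⟨p, hp, hpe⟩ := List.mem_map.mp hc
        exact hm (List.mem_map.mpr ⟨p, hp, (h1 p hp s0).mpr hpe⟩)
      rw [PySem.Set.add_of_not_mem hm, PySem.Set.add_of_not_mem hmB]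
      have e1 : zs.map Prod.fst ++ [kA s0] = (zs ++ [(kA s0, kB s0)]).map Prod.fst := by simp
      have e2 : zs.map Prod.snd ++ [kB s0] = (zs ++ [(kA s0, kB s0)]).map Prod.snd := by simp
      rw [e1, e2]
      apply ih
      · intro p hp s
        rcases List.mem_append.mp hp with hp | hp
        · exact h1 p hp s
        · simp only [List.mem_singleton] at hp
          subst hp
          exact hpat s0 s
      · intro p hp
        rcases List.mem_append.mp hp with hp | hp
        · exact h2 p hp
        · simp only [List.mem_singleton] at hp
          subst hp
          exact hl s0 (List.mem_cons_self)
      · exact fun s hs => hl s (List.mem_cons_of_mem _ hs)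

theorem zip_map_self (l : List (List Int)) (f : List Int → Int) :
    (l.map f).zip l = l.map (fun s => (f s, s)) := by
  induction l with
  | nil => rfl
  | cons a t ih => simp [ih]

-- B's dict-building loop is the raw fold
theorem groupB_dict (ps : List (Int × List Int)) :
    ps.foldl (fun (g : PySem.Dict Int CPySet) p =>
      let g := if g.contains p.1 then g else g.insert p.1 CPySet.empty
      p.2.foldl (fun g e => g.insert p.1 (CPySet.add (g.getD p.1 CPySet.empty) e)) g)
      PySem.Dict.empty = ps.foldl rawStep PySem.Dict.empty := rfl

theorem inv_empty : UFInv PySem.Dict.empty (fun z => z) (fun _ => 0) := by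
  have hpv : ∀ x : Int, pv PySem.Dict.empty x = x := fun x => PySem.Dict.getD_empty x x
  refine ⟨fun x _ => rfl, fun x => ?_, fun x => hpv x, fun x hx => absurd (hpv x) hx, fun _ _ => rfl⟩
  simp only [hpv]

theorem pairsIdx_len (lst : List (List Int)) :
    (pairsIdx lst).length ≤ lst.length * lst.length := by
  unfold pairsIdx
  rw [List.length_flatMap]
  have h1 : ∀ i ∈ PySem.List.pyRange 0 (lst.length : Int),
      (((PySem.List.pyRange (i + 1) (lst.length : Int)).filter (paB lst i)).map (fun j => (i, j))).length ≤ lst.length := by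
    intro i hi
    rw [List.length_map]
    calc ((PySem.List.pyRange (i + 1) (lst.length : Int)).filter (paB lst i)).length
        ≤ (PySem.List.pyRange (i + 1) (lst.length : Int)).length := List.length_filter_le _ _
      _ ≤ lst.length := by
          have hb := PySem.List.mem_pyRange_one.mp hi
          rw [PySem.List.length_pyRange_one]; omega
  calc ((PySem.List.pyRange 0 (lst.length : Int)).map
          (fun i => (((PySem.List.pyRange (i + 1) (lst.length : Int)).filter (paB lst i)).map (fun j => (i, j))).length)).sum
      ≤ ((PySem.List.pyRange 0 (lst.length : Int)).map
          (fun i => (((PySem.List.pyRange (i + 1) (lst.length : Int)).filter (paB lst i)).map (fun j => (i, j))).length)).length * lst.length := by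
        apply List.sum_le_card_nsmul
        intro x hx
        obtain ⟨i, hi, rfl⟩ := List.mem_map.mp hx
        exact h1 i hi
    _ ≤ lst.length * lst.length := by
        rw [List.length_map, PySem.List.length_pyRange_one]
        have : ((lst.length : Int) - 0).toNat = lst.length := by omega
        rw [this]

-- phiKey on the two keyed lists agrees class by class
theorem phiKey_pattern (lst : List (List Int)) (kA kB : List Int → Int)
    (hpat : ∀ s s', (kA s = kA s') ↔ (kB s = kB s')) (s : List Int) :
    phiKey (lst.map (fun s' => (kA s', s'))) (kA s) =
      phiKey (lst.map (fun s' => (kB s', s'))) (kB s) := by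
  unfold phiKey
  rw [List.filter_map, List.filter_map, List.flatMap_map, List.flatMap_map]
  have e : ∀ (k : List Int → Int),
      (lst.filter ((fun (p : Int × List Int) => p.1 == k s) ∘ fun s' => (k s', s'))).flatMap
          (fun a => ((k a, a) : Int × List Int).2)
        = (lst.filter (fun s' => k s' == k s)).flatMap (fun a => a) := fun k => rfl
  rw [e kA, e kB]
  have hfil : lst.filter (fun s' => kA s' == kA s) = lst.filter (fun s' => kB s' == kB s) := by
    apply List.filter_congr
    intro s' _
    rw [Bool.eq_iff_iff]
    simp only [beq_iff_eq]
    exact hpat s' s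
  rw [hfil]

-- ===== VERDICT (by name: the statement is the Claim_ definition above) =====
theorem group_sublists_spec : Claim_equal_group_sublists := by
  intro lst _ _
  show group_sublists lst = group_sublists_alt lst
  show groupPhaseA (lst.length * lst.length + 2) (unionPassA lst (lst.length * lst.length + 2)) lst
     = groupPhaseB (lst.length * lst.length + 2) (unionPassB lst (lst.length * lst.length + 2)) lst
  set F := lst.length * lst.length + 2 with hF
  have hlen := pairsIdx_len lst
  have h0 : Couple ⟨PySem.Dict.empty, PySem.Dict.empty⟩ (PySem.Dict.empty, PySem.Dict.empty) 0 :=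
    ⟨fun z => z, fun _ => 0, fun z => z, fun _ => 0, inv_empty, inv_empty,
      fun _ => le_refl 0, fun _ => le_refl 0, fun _ _ => Iff.rfl⟩
  obtain ⟨rhoA, dA, rhoB, dB, hA, hB, hbA, hbB, hcpl⟩ :=
    coupled_fold F lst (pairsIdx lst) ⟨PySem.Dict.empty, PySem.Dict.empty⟩
      (PySem.Dict.empty, PySem.Dict.empty) 0 h0 (by omega)
  have hfA : ∀ z, dA z < F := fun z => by have := hbA z; omega
  have hfB : ∀ z, dB z < F := fun z => by have := hbB z; omega
  rw [passA_eq lst F, passB_eq lst F]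
  unfold groupPhaseA groupPhaseB
  rw [groupA_fold F rhoA dA lst _ PySem.Dict.empty hA hfA]
  rw [groupB_roots F rhoB dB lst _ [] hB hfB]
  rw [List.nil_append, zip_map_self, groupB_dict]
  rw [rawFold_eq_gBuild _ _ (PySem.Dict.nodup_keys_empty), rawFold_eq_gBuild _ _ (PySem.Dict.nodup_keys_empty)]
  rw [gBuild_values, gBuild_values]
  congr 1
  simp only [List.map_map]
  have hpat : ∀ s s' : List Int,
      (rhoA (PySem.List.pyGetD s 0 0) = rhoA (PySem.List.pyGetD s' 0 0)) ↔
      (rhoB (PySem.List.pyGetD s 0 0) = rhoB (PySem.List.pyGetD s' 0 0)) :=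
    fun s s' => hcpl _ _
  rw [PySem.Set.ofList_eq_foldl, PySem.Set.ofList_eq_foldl, List.foldl_map, List.foldl_map]
  exact foldadd_congr _ _ _ _ hpat lst [] (fun p hp => absurd hp (List.not_mem_nil))
    (fun p hp => absurd hp (List.not_mem_nil))
    (fun s _ => phiKey_pattern lst _ _ hpat s)
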